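-- pv_equiv track=rewrite | github.com/mathan416/merlin | battleship_ui.py | _ghost_cells
-- ===== SOURCE A (Python) =====
-- GRID_W = 10
--
-- GRID_H = 10
--
-- def _ghost_cells(session, length, horiz, gx, gy):
--     cells = []
--     for i in range(length):
--         x = gx + (i if horiz else 0)
--         y = gy + (0 if horiz else i)
--         if 0 <= x < GRID_W and 0 <= y < GRID_H:
--             cells.append((x, y))
--     return cells
-- ===== SOURCE B (Python) =====
-- GRID_W = 10
-- GRID_H = 10
--
-- def _ghost_cells(session, length, horiz, gx, gy):
--     # Decide the fixed axis once, then emit the clamped contiguous run on the moving axis.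
--     if horiz:
--         if not (0 <= gy < GRID_H):
--             return []
--         lo = max(0, -gx)
--         hi = min(length - 1, GRID_W - 1 - gx)
--         return [(gx + i, gy) for i in range(lo, hi + 1)]
--     else:
--         if not (0 <= gx < GRID_W):
--             return []
--         lo = max(0, -gy)
--         hi = min(length - 1, GRID_H - 1 - gy)
--         return [(gx, gy + i) for i in range(lo, hi + 1)]
-- ===== Notes on version B (the rewrite author's own statement) =====
-- stated objective: faster
-- what changed: Replaces the per-cell bounds test over all `length` indices with one up-front check of the fixed axis plus a clamped interval [lo,hi] on the moving axis, emitting only the in-bounds cells.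
import Mathlib
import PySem

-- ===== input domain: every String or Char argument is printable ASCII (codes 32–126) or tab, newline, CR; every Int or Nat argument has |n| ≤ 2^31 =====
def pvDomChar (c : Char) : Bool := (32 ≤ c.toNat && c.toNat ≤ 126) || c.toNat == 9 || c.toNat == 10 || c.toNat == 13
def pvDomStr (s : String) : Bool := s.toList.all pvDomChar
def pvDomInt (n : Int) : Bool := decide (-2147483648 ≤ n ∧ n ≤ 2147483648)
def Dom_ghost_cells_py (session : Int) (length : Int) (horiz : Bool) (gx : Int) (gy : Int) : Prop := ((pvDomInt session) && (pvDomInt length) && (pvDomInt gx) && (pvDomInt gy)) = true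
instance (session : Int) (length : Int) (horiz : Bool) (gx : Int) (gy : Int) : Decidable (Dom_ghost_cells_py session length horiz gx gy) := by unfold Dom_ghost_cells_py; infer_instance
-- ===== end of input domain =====

-- B replaces A's per-index bounds test with a fixed-axis check and a clamped interval on the moving axis (faster when length >> grid size).
-- ===== PORT A =====
-- GRID_W = GRID_H = 10 (module constants)
def ghost_cells_py (session : Int) (length : Int) (horiz : Bool) (gx : Int) (gy : Int) : List (Int × Int) :=
  (PySem.List.pyRange 0 length 1).foldl (fun cells i =>
    let x := gx + (if horiz then i else 0)
    let y := gy + (if horiz then 0 else i)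
    if 0 ≤ x ∧ x < 10 ∧ 0 ≤ y ∧ y < 10 then cells ++ [(x, y)] else cells) []

-- ===== PORT B =====
def ghost_cells_py_alt (session : Int) (length : Int) (horiz : Bool) (gx : Int) (gy : Int) : List (Int × Int) :=
  if horiz then
    if 0 ≤ gy ∧ gy < 10 then
      (PySem.List.pyRange (max 0 (-gx)) (min (length - 1) (10 - 1 - gx) + 1) 1).map (fun i => (gx + i, gy))
    else []
  else
    if 0 ≤ gx ∧ gx < 10 then
      (PySem.List.pyRange (max 0 (-gy)) (min (length - 1) (10 - 1 - gy) + 1) 1).map (fun i => (gx, gy + i))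
    else []

-- ===== PRECONDITION & SPEC =====
def Spec_ghost_cells_py (session : Int) (length : Int) (horiz : Bool) (gx : Int) (gy : Int) (out : List (Int × Int)) : Prop := out = ghost_cells_py_alt session length horiz gx gy
instance (session : Int) (length : Int) (horiz : Bool) (gx : Int) (gy : Int) (out : List (Int × Int)) : Decidable (Spec_ghost_cells_py session length horiz gx gy out) := by unfold Spec_ghost_cells_py; infer_instance

-- ===== CLAIM (what is proved, stated in full; the proofs are below) =====
def Claim_equal_ghost_cells_py : Prop := ∀ (session : Int) (length : Int) (horiz : Bool) (gx : Int) (gy : Int), Dom_ghost_cells_py session length horiz gx gy → Spec_ghost_cells_py session length horiz gx gy (ghost_cells_py session length horiz gx gy)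

-- ===== LEMMAS AND PROOFS =====

-- The in-bounds indices of range(0, m) under 0 ≤ g+i < 10 form the clamped contiguous range.
theorem clamp_filter_nat (g : Int) (m : Nat) :
    (PySem.List.pyRange 0 (m : Int) 1).filter (fun i => decide (0 ≤ g + i ∧ g + i < 10))
      = PySem.List.pyRange (max 0 (-g)) (min ((m : Int) - 1) (10 - 1 - g) + 1) 1 := by
  induction m with
  | zero =>
    rw [PySem.List.pyRange_one_eq_nil (by omega), List.filter_nil,
      PySem.List.pyRange_one_eq_nil (by omega)]
  | succ k ih =>
    have hk : ((k + 1 : Nat) : Int) = (k : Int) + 1 := by push_cast; ring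
    rw [hk, PySem.List.pyRange_one_succ_right (by positivity), List.filter_append]
    by_cases hc : 0 ≤ g + (k : Int) ∧ g + (k : Int) < 10
    · have h1 : min ((k : Int) + 1 - 1) (10 - 1 - g) + 1 = (k : Int) + 1 := by omega
      have h2 : min ((k : Int) - 1) (10 - 1 - g) + 1 = (k : Int) := by omega
      rw [h1, PySem.List.pyRange_one_succ_right (by omega), ih, h2]
      simp [hc]
    · rcases (by omega : g + (k : Int) < 0 ∨ 10 ≤ g + (k : Int)) with hlt | hge
      · have h1 : min ((k : Int) + 1 - 1) (10 - 1 - g) + 1 ≤ max 0 (-g) := by omega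
        have h2 : min ((k : Int) - 1) (10 - 1 - g) + 1 ≤ max 0 (-g) := by omega
        rw [PySem.List.pyRange_one_eq_nil h1, ih, PySem.List.pyRange_one_eq_nil h2]
        simp [hc]
      · have h1 : min ((k : Int) + 1 - 1) (10 - 1 - g) + 1
            = min ((k : Int) - 1) (10 - 1 - g) + 1 := by omega
        rw [h1, ih]
        simp [hc]

theorem clamp_filter (g n : Int) :
    (PySem.List.pyRange 0 n 1).filter (fun i => decide (0 ≤ g + i ∧ g + i < 10))
      = PySem.List.pyRange (max 0 (-g)) (min (n - 1) (10 - 1 - g) + 1) 1 := by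
  by_cases h : n ≤ 0
  · rw [PySem.List.pyRange_one_eq_nil h, List.filter_nil,
      PySem.List.pyRange_one_eq_nil (by omega)]
  · have : n = ((n.toNat : Nat) : Int) := by omega
    rw [this]; exact clamp_filter_nat g n.toNat

-- ===== VERDICT (by name: the statement is the Claim_ definition above) =====
theorem ghost_cells_py_spec : Claim_equal_ghost_cells_py := by
  intro session length horiz gx gy _
  unfold Spec_ghost_cells_py ghost_cells_py ghost_cells_py_alt
  cases horiz with
  | true =>
    simp only [if_true, add_zero]
    rw [PySem.List.foldl_append_ite
      (p := fun i => 0 ≤ gx + i ∧ gx + i < 10 ∧ 0 ≤ gy ∧ gy < 10)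
      (f := fun i => (gx + i, gy))]
    by_cases hy : 0 ≤ gy ∧ gy < 10
    · rw [if_pos hy, List.filter_congr (fun i _ => by
        simp only [decide_eq_decide]; constructor
        · intro h; exact ⟨h.1, h.2.1⟩
        · intro h; exact ⟨h.1, h.2, hy.1, hy.2⟩ :
        ∀ i ∈ PySem.List.pyRange 0 length 1,
          (decide (0 ≤ gx + i ∧ gx + i < 10 ∧ 0 ≤ gy ∧ gy < 10) : Bool)
            = decide (0 ≤ gx + i ∧ gx + i < 10))]
      rw [clamp_filter gx length]
      simp
    · rw [if_neg hy]
      have : ∀ i ∈ PySem.List.pyRange 0 length 1,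
          ¬ (0 ≤ gx + i ∧ gx + i < 10 ∧ 0 ≤ gy ∧ gy < 10) := by
        intro i _ h; exact hy ⟨h.2.2.1, h.2.2.2⟩
      rw [List.filter_eq_nil_iff.mpr (by intro i hi; simpa using this i hi)]
      simp
  | false =>
    simp only [Bool.false_eq_true, if_false, add_zero]
    rw [PySem.List.foldl_append_ite
      (p := fun i => 0 ≤ gx ∧ gx < 10 ∧ 0 ≤ gy + i ∧ gy + i < 10)
      (f := fun i => (gx, gy + i))]
    by_cases hx : 0 ≤ gx ∧ gx < 10
    · rw [if_pos hx, List.filter_congr (fun i _ => by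
        simp only [decide_eq_decide]; constructor
        · intro h; exact ⟨h.2.2.1, h.2.2.2⟩
        · intro h; exact ⟨hx.1, hx.2, h.1, h.2⟩ :
        ∀ i ∈ PySem.List.pyRange 0 length 1,
          (decide (0 ≤ gx ∧ gx < 10 ∧ 0 ≤ gy + i ∧ gy + i < 10) : Bool)
            = decide (0 ≤ gy + i ∧ gy + i < 10))]
      rw [clamp_filter gy length]
      simp
    · rw [if_neg hx]
      have : ∀ i ∈ PySem.List.pyRange 0 length 1,
          ¬ (0 ≤ gx ∧ gx < 10 ∧ 0 ≤ gy + i ∧ gy + i < 10) := by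
        intro i _ h; exact hx ⟨h.1, h.2.1⟩
      rw [List.filter_eq_nil_iff.mpr (by intro i hi; simpa using this i hi)]
      simp
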